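-- pv_equiv track=rewrite | github.com/Agulaa/DataSecurity-Cryptography | PlayFair.py | check_double_letter
-- ===== SOURCE A (Python) =====
-- def check_double_letter(splited_text):
--     """
--     Sprawdzenie czy w jakimś słowie nie ma podwójnej literki, jeśli tak to rozdzielenie tych liter literą X
--     :param splited_text: podzielony tekst na słowa
--     :return: tablica z nowymi słowami
--     """
--     new_splited_text = []
--     for word in splited_text:
--         new_word = []
--         for i in range(0, len(word)):
--             new_word.append(word[i])
--             if i+1 != len(word):
--                 if word[i] == word[i+1]:
--                     new_word.append('X')
--         new_splited_text.append(new_word)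
--     return new_splited_text
-- ===== SOURCE B (Python) =====
-- def check_double_letter(splited_text):
--     """
--     Run-grouping re-implementation: split each word into maximal runs of equal
--     letters and emit c, then ('X', c) repeated (run-1) times per run.
--     """
--     new_splited_text = []
--     for word in splited_text:
--         new_word = []
--         rest = word
--         while rest:
--             c = rest[0]
--             tail = rest[1:]
--             run = 0
--             while run < len(tail) and tail[run] == c:
--                 run += 1
--             new_word.append(c)
--             new_word.extend(['X', c] * run)
--             rest = tail[run:]
--         new_splited_text.append(new_word)
--     return new_splited_text
-- ===== Notes on version B (the rewrite author's own statement) =====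
-- stated objective: alternative
-- what changed: Replaced A's index-based look-ahead over range(len(word)) with a run-grouping traversal: each maximal run of n equal letters emits c followed by (n-1) copies of 'X', c, with no per-index look-ahead comparison.
import Mathlib
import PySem

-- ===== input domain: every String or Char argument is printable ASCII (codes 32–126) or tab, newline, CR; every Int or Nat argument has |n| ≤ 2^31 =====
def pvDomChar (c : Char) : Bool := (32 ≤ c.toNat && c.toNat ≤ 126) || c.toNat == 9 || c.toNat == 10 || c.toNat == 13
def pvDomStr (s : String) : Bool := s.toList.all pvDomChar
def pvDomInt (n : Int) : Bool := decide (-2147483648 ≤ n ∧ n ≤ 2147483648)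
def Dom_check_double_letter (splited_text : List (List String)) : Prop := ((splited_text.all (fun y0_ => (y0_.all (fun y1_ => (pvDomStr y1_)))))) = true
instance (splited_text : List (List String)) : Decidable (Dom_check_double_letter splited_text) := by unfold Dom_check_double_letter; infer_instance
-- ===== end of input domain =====

-- B replaces A's index-based look-ahead pass by a run-grouping traversal; equally fast, different decomposition.

-- ===== PORT A =====
-- inner loop of A: for i in range(0, len(word)): append word[i]; if i+1 != len(word) and word[i]==word[i+1]: append 'X'
def aWord (word : List String) : List String :=
  (PySem.List.pyRange 0 (word.length : Int) 1).foldl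
    (fun nw i =>
      let nw := nw ++ [PySem.List.pyGetD word i ""]
      if i + 1 ≠ (word.length : Int) then
        if PySem.List.pyGetD word i "" == PySem.List.pyGetD word (i + 1) "" then nw ++ ["X"] else nw
      else nw) []

def check_double_letter (splited_text : List (List String)) : List (List String) :=
  splited_text.foldl (fun acc word => acc ++ [aWord word]) []

-- ===== PORT B =====
-- inner while: run = 0; while run < len(tail) and tail[run] == c: run += 1
def runLen (c : String) : List String → Nat
  | [] => 0
  | x :: xs => if x == c then runLen c xs + 1 else 0

-- outer while over rest: emit c, then ('X', c) * run, then continue on tail[run:]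
def bWord : List String → List String
  | [] => []
  | c :: tail =>
    let run := runLen c tail
    (c :: (List.replicate run ["X", c]).flatten) ++ bWord (tail.drop run)
termination_by l => l.length
decreasing_by simp [List.length_drop]

def check_double_letter_alt (splited_text : List (List String)) : List (List String) :=
  splited_text.map bWord

-- ===== PRECONDITION & SPEC =====
def Spec_check_double_letter (splited_text : List (List String)) (out : List (List String)) : Prop := out = check_double_letter_alt splited_text
instance (splited_text : List (List String)) (out : List (List String)) : Decidable (Spec_check_double_letter splited_text out) := by unfold Spec_check_double_letter; infer_instance

-- ===== CLAIM (what is proved, stated in full; the proofs are below) =====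
def Claim_equal_check_double_letter : Prop := ∀ (splited_text : List (List String)), Dom_check_double_letter splited_text → Spec_check_double_letter splited_text (check_double_letter splited_text)

-- ===== LEMMAS AND PROOFS =====

-- what A's fold appends at natural index k
def gChunk (word : List String) (k : Nat) : List String :=
  [word.getD k ""] ++
    (if k + 1 ≠ word.length then
       (if word.getD k "" == word.getD (k + 1) "" then ["X"] else [])
     else [])

-- A's inner pass as a recursion on the word
def aGo : List String → List String
  | [] => []
  | [a] => [a]
  | a :: b :: rest => (a :: (if a == b then ["X"] else [])) ++ aGo (b :: rest)

lemma aWord_eq_flatMap (word : List String) :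
    aWord word = (List.range word.length).flatMap (gChunk word) := by
  unfold aWord
  have hfun :
      (fun (nw : List String) (i : Int) =>
        let nw := nw ++ [PySem.List.pyGetD word i ""]
        if i + 1 ≠ (word.length : Int) then
          if PySem.List.pyGetD word i "" == PySem.List.pyGetD word (i + 1) "" then nw ++ ["X"] else nw
        else nw)
      = (fun (nw : List String) (i : Int) =>
          nw ++ ([PySem.List.pyGetD word i ""] ++
            (if i + 1 ≠ (word.length : Int) then
              (if PySem.List.pyGetD word i "" == PySem.List.pyGetD word (i + 1) "" then ["X"] else [])
             else []))) := by
    funext nw i; simp only []; split_ifs <;> simp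
  rw [hfun, PySem.List.foldl_append_eq_flatMap, PySem.List.pyRange_one]
  have hn : (((word.length : Int)) - 0).toNat = word.length := by simp
  rw [hn]
  simp only [List.flatMap_map]
  refine List.flatMap_congr fun k _ => ?_
  simp only [gChunk, zero_add, PySem.List.pyGetD_natCast, List.singleton_append]
  have h1 : ((k : Int) + 1) = ((k + 1 : Nat) : Int) := by push_cast; ring
  rw [h1, PySem.List.pyGetD_natCast]
  have h2 : ((k + 1 : Nat) : Int) ≠ (word.length : Int) ↔ k + 1 ≠ word.length := by
    exact not_congr Int.natCast_inj
  simp only [h2]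

lemma gChunk_shift (a : String) (rest : List String) (k : Nat) :
    gChunk (a :: rest) (k + 1) = gChunk rest k := by
  have h : k + 1 + 1 ≠ rest.length + 1 ↔ k + 1 ≠ rest.length := by omega
  simp [gChunk, h]

lemma flatMap_range_eq_aGo (word : List String) :
    (List.range word.length).flatMap (gChunk word) = aGo word := by
  induction word with
  | nil => simp [aGo]
  | cons a rest ih =>
    rw [List.length_cons, List.range_succ_eq_map, List.flatMap_cons, List.flatMap_map]
    have hsh : (List.range rest.length).flatMap (fun k => gChunk (a :: rest) (k + 1))
        = aGo rest := by
      rw [List.flatMap_congr fun k _ => gChunk_shift a rest k, ih]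
    cases rest with
    | nil => simp [gChunk, aGo]
    | cons b rest2 =>
      rw [hsh]
      simp [gChunk, aGo]

lemma bWord_cons (c : String) (tail : List String) :
    bWord (c :: tail) =
      (c :: (List.replicate (runLen c tail) ["X", c]).flatten) ++ bWord (tail.drop (runLen c tail)) := by
  rw [bWord]

lemma aGo_eq_bWord_aux : ∀ (n : Nat) (l : List String), l.length ≤ n → aGo l = bWord l := by
  intro n
  induction n with
  | zero =>
    intro l h
    cases l with
    | nil => rw [bWord]; rfl
    | cons a t => simp at h
  | succ n ih =>
    intro l h
    match l with
    | [] => rw [bWord]; rfl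
    | [a] => rw [bWord_cons]; simp [aGo, runLen, bWord]
    | a :: b :: rest =>
      by_cases hab : a = b
      · subst hab
        have hlen : (a :: rest).length ≤ n := by simpa using h
        have ihr := ih (a :: rest) hlen
        rw [bWord_cons] at ihr ⊢
        have hr : runLen a (a :: rest) = runLen a rest + 1 := by simp [runLen]
        rw [hr]
        simp only [List.replicate_succ, List.flatten_cons, List.drop_succ_cons]
        have : aGo (a :: a :: rest) = (a :: ["X"]) ++ aGo (a :: rest) := by
          simp [aGo]
        rw [this, ihr]
        simp
      · have hne : (b == a) = false := by
          simp [beq_eq_false_iff_ne]; exact fun hba => hab hba.symm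
        have hlen : (b :: rest).length ≤ n := by simpa using h
        have ihr := ih (b :: rest) hlen
        rw [bWord_cons]
        have hr : runLen a (b :: rest) = 0 := by simp [runLen, hne]
        rw [hr]
        simp only [List.replicate_zero, List.flatten_nil, List.drop_zero]
        have : aGo (a :: b :: rest) = (a :: []) ++ aGo (b :: rest) := by
          simp [aGo, beq_eq_false_iff_ne.mpr hab]
        rw [this, ihr]

lemma aGo_eq_bWord (l : List String) : aGo l = bWord l :=
  aGo_eq_bWord_aux l.length l le_rfl

-- ===== VERDICT (by name: the statement is the Claim_ definition above) =====
theorem check_double_letter_spec : Claim_equal_check_double_letter := by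
  intro st _
  unfold Spec_check_double_letter check_double_letter check_double_letter_alt
  rw [PySem.List.foldl_append_singleton_eq_map]
  simp only [List.nil_append]
  exact List.map_congr_left fun w _ => by
    rw [aWord_eq_flatMap, flatMap_range_eq_aGo, aGo_eq_bWord]
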